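-- pv_equiv track=rewrite | github.com/ndave24/CS-4365 | src/feature_stability.py | _base_feature_from_transformed_name
-- ===== SOURCE A (Python) =====
-- from typing import Dict, Iterable
--
-- def _clean_transformed_name(name: str) -> str:
--     """
--     Remove sklearn ColumnTransformer prefixes like num__ and cat__.
--     """
--     if name.startswith("num__"):
--         return name.replace("num__", "", 1)
--     if name.startswith("cat__"):
--         return name.replace("cat__", "", 1)
--     return name
--
-- def _base_feature_from_transformed_name(
--     transformed_name: str,
--     numeric_cols: Iterable[str],
--     categorical_cols: Iterable[str],
-- ) -> str:
--     """
--     Map transformed feature names back to their original feature column.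
--
--     Examples:
--     - num__loan_amnt -> loan_amnt
--     - cat__purpose_debt_consolidation -> purpose
--     - cat__home_ownership_n_RENT -> home_ownership_n
--     """
--     clean_name = _clean_transformed_name(transformed_name)
--
--     numeric_cols = list(numeric_cols)
--     categorical_cols = list(categorical_cols)
--
--     if clean_name in numeric_cols:
--         return clean_name
--
--     # Match longest categorical column first in case one name is a prefix of another.
--     for col in sorted(categorical_cols, key=len, reverse=True):
--         if clean_name == col or clean_name.startswith(col + "_"):
--             return col
--
--     return clean_name
-- ===== SOURCE B (Python) =====
-- def _base_feature_from_transformed_name(transformed_name, numeric_cols, categorical_cols):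
--     clean = transformed_name
--     if clean.startswith("num__"):
--         clean = clean[5:]
--     elif clean.startswith("cat__"):
--         clean = clean[5:]
--     if clean in set(numeric_cols):
--         return clean
--     cat_set = set(categorical_cols)
--     if clean in cat_set:
--         return clean
--     # longest matching underscore-boundary prefix wins, same as A's length-sorted scan
--     for i in range(len(clean) - 1, -1, -1):
--         if clean[i] == "_" and clean[:i] in cat_set:
--             return clean[:i]
--     return clean
-- ===== Notes on version B (the rewrite author's own statement) =====
-- stated objective: alternative
-- what changed: Instead of sorting the categorical columns by length and scanning them with string comparisons, B builds a set of categorical columns once and tests the underscore-boundary prefixes of the cleaned name from longest to shortest with set lookups.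
import Mathlib
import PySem

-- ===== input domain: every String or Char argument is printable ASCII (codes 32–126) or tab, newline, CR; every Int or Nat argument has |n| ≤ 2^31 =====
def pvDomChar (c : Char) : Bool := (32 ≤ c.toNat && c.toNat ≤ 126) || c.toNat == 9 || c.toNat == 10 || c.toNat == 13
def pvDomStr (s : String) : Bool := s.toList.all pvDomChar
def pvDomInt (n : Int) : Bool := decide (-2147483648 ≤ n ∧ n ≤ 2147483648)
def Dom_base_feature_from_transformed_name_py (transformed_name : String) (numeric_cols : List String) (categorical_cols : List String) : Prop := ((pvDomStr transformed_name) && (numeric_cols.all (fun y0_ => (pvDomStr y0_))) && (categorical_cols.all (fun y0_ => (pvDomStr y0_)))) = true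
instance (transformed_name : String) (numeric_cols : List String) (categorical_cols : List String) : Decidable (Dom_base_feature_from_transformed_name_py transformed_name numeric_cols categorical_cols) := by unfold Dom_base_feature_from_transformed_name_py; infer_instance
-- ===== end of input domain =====

-- ===== PORT A =====
-- B replaces A's length-sorted scan of categorical columns by set lookups on the
-- underscore-boundary prefixes of the cleaned name (objective: alternative lookup strategy).

-- hand port of Python's s.replace(old, new, 1): splice at the FIRST occurrence
-- (exact: Python finds the first occurrence — '' occurs at index 0 — and replaces only it)
def pvReplaceOnce (s old new : String) : String :=
  let i := PySem.Str.find s old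
  if i = -1 then s
  else String.ofList (s.toList.take i.toNat ++ new.toList ++ s.toList.drop (i.toNat + old.toList.length))

-- port of _clean_transformed_name
def pvCleanName (name : String) : String :=
  if PySem.Str.startswith name "num__" then pvReplaceOnce name "num__" ""
  else if PySem.Str.startswith name "cat__" then pvReplaceOnce name "cat__" ""
  else name

def base_feature_from_transformed_name_py (transformed_name : String) (numeric_cols : List String) (categorical_cols : List String) : String :=
  let clean := pvCleanName transformed_name
  if numeric_cols.contains clean then clean
  else
    -- 'for col in sorted(categorical_cols, key=len, reverse=True): if …: return col'
    match (PySem.List.sorted categorical_cols (fun c => PySem.Str.len c) true).find?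
        (fun col => clean == col || PySem.Str.startswith clean (String.ofList (col.toList ++ ['_']))) with
    | some col => col
    | none => clean

-- ===== PORT B =====
-- port of B's prefix cleaning: clean = name[5:] when a known prefix is present
def pvCleanNameAlt (name : String) : String :=
  if PySem.Str.startswith name "num__" then String.ofList (PySem.List.slice name.toList (some 5) none)
  else if PySem.Str.startswith name "cat__" then String.ofList (PySem.List.slice name.toList (some 5) none)
  else name

-- port of B's loop 'for i in range(len(clean)-1, -1, -1): if clean[i] == "_" and clean[:i] in cat_set: return clean[:i]'
def pvScanBoundaries (cs : List Char) (catSet : PySem.Set String) : Nat → Option String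
  | 0 => none
  | i + 1 =>
    if cs[i]? == some '_' && PySem.Set.contains catSet (String.ofList (cs.take i))
    then some (String.ofList (cs.take i))
    else pvScanBoundaries cs catSet i

def base_feature_from_transformed_name_py_alt (transformed_name : String) (numeric_cols : List String) (categorical_cols : List String) : String :=
  let clean := pvCleanNameAlt transformed_name
  if PySem.Set.contains (PySem.Set.ofList numeric_cols) clean then clean
  else
    let catSet := PySem.Set.ofList categorical_cols
    if PySem.Set.contains catSet clean then clean
    else
      match pvScanBoundaries clean.toList catSet clean.toList.length with
      | some s => s
      | none => clean

-- ===== PRECONDITION & SPEC =====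
def Spec_base_feature_from_transformed_name_py (transformed_name : String) (numeric_cols : List String) (categorical_cols : List String) (out : String) : Prop := out = base_feature_from_transformed_name_py_alt transformed_name numeric_cols categorical_cols
instance (transformed_name : String) (numeric_cols : List String) (categorical_cols : List String) (out : String) : Decidable (Spec_base_feature_from_transformed_name_py transformed_name numeric_cols categorical_cols out) := by unfold Spec_base_feature_from_transformed_name_py; infer_instance

-- ===== CLAIM (what is proved, stated in full; the proofs are below) =====
def Claim_equal_base_feature_from_transformed_name_py : Prop := ∀ (transformed_name : String) (numeric_cols : List String) (categorical_cols : List String), Dom_base_feature_from_transformed_name_py transformed_name numeric_cols categorical_cols → Spec_base_feature_from_transformed_name_py transformed_name numeric_cols categorical_cols (base_feature_from_transformed_name_py transformed_name numeric_cols categorical_cols)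

-- ===== LEMMAS AND PROOFS =====

-- the match predicate of A's loop
def pvMatch (clean col : String) : Bool :=
  clean == col || PySem.Str.startswith clean (String.ofList (col.toList ++ ['_']))

lemma append_singleton_prefix_iff (l : List Char) (c : Char) (cs : List Char) :
    (l ++ [c]) <+: cs ↔ l <+: cs ∧ cs[l.length]? = some c := by
  constructor
  · rintro ⟨t, ht⟩
    rw [List.append_assoc] at ht
    subst ht
    refine ⟨⟨[c] ++ t, rfl⟩, ?_⟩
    simp
  · rintro ⟨⟨t, ht⟩, hc⟩
    subst ht
    rcases t with _ | ⟨d, t⟩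
    · simp at hc
    · simp at hc
      subst hc
      exact ⟨t, by simp⟩

lemma pvMatch_iff (clean col : String) :
    pvMatch clean col = true ↔
      col.toList <+: clean.toList ∧
        (col.toList.length = clean.toList.length ∨ clean.toList[col.toList.length]? = some '_') := by
  unfold pvMatch
  rw [Bool.or_eq_true, beq_iff_eq, PySem.Str.startswith_eq, PySem.Chars.startswith_iff,
    String.toList_ofList, append_singleton_prefix_iff]
  constructor
  · rintro (rfl | ⟨h1, h2⟩)
    · exact ⟨List.prefix_refl _, Or.inl rfl⟩
    · exact ⟨h1, Or.inr h2⟩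
  · rintro ⟨h1, (hl | hc)⟩
    · left
      have := List.prefix_iff_eq_take.mp h1
      rw [hl, List.take_length] at this
      exact (String.toList_inj.mp this).symm
    · exact Or.inr ⟨h1, hc⟩

-- a match is determined by its length
lemma pvMatch_eq_of_length_eq {clean x y : String}
    (hx : pvMatch clean x = true) (hy : pvMatch clean y = true)
    (hl : x.toList.length = y.toList.length) : x = y := by
  have hx' := ((pvMatch_iff clean x).mp hx).1
  have hy' := ((pvMatch_iff clean y).mp hy).1
  have : x.toList = y.toList := by
    rw [List.prefix_iff_eq_take.mp hx', List.prefix_iff_eq_take.mp hy', hl]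
  exact String.toList_inj.mp this

lemma pvMatch_self (clean : String) : pvMatch clean clean = true := by
  simp [pvMatch]

-- a scan hit gives a match
lemma pvMatch_of_hit {cs : List Char} {i : Nat} (hi : cs[i]? = some '_') :
    pvMatch (String.ofList cs) (String.ofList (cs.take i)) = true := by
  have hlen : i < cs.length := by
    by_contra h
    rw [List.getElem?_eq_none (by omega)] at hi
    simp at hi
  rw [pvMatch_iff]
  simp only [String.toList_ofList]
  refine ⟨List.take_prefix _ _, Or.inr ?_⟩
  rw [List.length_take, Nat.min_eq_left (by omega)]
  exact hi

lemma pvScanBoundaries_eq_none_iff (cs : List Char) (S : PySem.Set String) (n : Nat) :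
    pvScanBoundaries cs S n = none ↔
      ∀ i < n, ¬(cs[i]? = some '_' ∧ String.ofList (cs.take i) ∈ S) := by
  induction n with
  | zero => simp [pvScanBoundaries]
  | succ m ih =>
    unfold pvScanBoundaries
    by_cases h : (cs[m]? == some '_' && PySem.Set.contains S (String.ofList (cs.take m))) = true
    · rw [if_pos h]
      simp only [Bool.and_eq_true, beq_iff_eq, PySem.Set.contains_iff] at h
      constructor
      · intro hc; exact absurd hc (by simp)
      · intro hall; exact absurd h (hall m (by omega))
    · rw [if_neg h, ih]
      simp only [Bool.and_eq_true, beq_iff_eq, PySem.Set.contains_iff] at h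
      constructor
      · intro hall i hi
        rcases Nat.lt_succ_iff_lt_or_eq.mp hi with h' | rfl
        · exact hall i h'
        · intro hc; exact h (by simp [hc.1, hc.2])
      · intro hall i hi; exact hall i (by omega)

lemma pvScanBoundaries_eq_some_of (cs : List Char) (S : PySem.Set String) (n k : Nat)
    (hk : k < n) (hu : cs[k]? = some '_') (hmem : String.ofList (cs.take k) ∈ S)
    (hmax : ∀ j, k < j → j < n → ¬(cs[j]? = some '_' ∧ String.ofList (cs.take j) ∈ S)) :
    pvScanBoundaries cs S n = some (String.ofList (cs.take k)) := by
  induction n with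
  | zero => omega
  | succ m ih =>
    unfold pvScanBoundaries
    by_cases hkm : k = m
    · subst hkm
      rw [if_pos (by simp [hu, hmem])]
    · have hkm' : k < m := by omega
      have hno : ¬((cs[m]? == some '_' && PySem.Set.contains S (String.ofList (cs.take m))) = true) := by
        simp only [Bool.and_eq_true, beq_iff_eq, PySem.Set.contains_iff]
        exact hmax m hkm' (by omega)
      rw [if_neg hno]
      exact ih hkm' (fun j hj1 hj2 => hmax j hj1 (by omega))

-- the two cleaning helpers agree
lemma clean_eq (name : String) : pvCleanName name = pvCleanNameAlt name := by
  unfold pvCleanName pvCleanNameAlt pvReplaceOnce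
  have hslice : PySem.List.slice name.toList (some 5) none = name.toList.drop 5 := by
    have := PySem.List.slice_from_natCast name.toList 5
    exact_mod_cast this
  by_cases h1 : PySem.Str.startswith name "num__"
  · rw [if_pos h1, if_pos h1]
    have hpre : "num__".toList <+: name.toList := by
      rw [PySem.Str.startswith_eq, PySem.Chars.startswith_iff] at h1
      exact h1
    have hfind : PySem.Str.find name "num__" = 0 := by
      have hinfix : "num__".toList <:+: name.toList := hpre.isInfix
      have hnn : 0 ≤ PySem.Str.find name "num__" := (PySem.Str.find_nonneg_iff _ _).mpr hinfix
      rw [PySem.Str.find_eq] at hnn ⊢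
      rcases PySem.Chars.find_spec hnn with ⟨_, hmin⟩
      by_contra hne
      exact hmin 0 (by omega) (by simpa using hpre)
    rw [hfind]
    simp only [hslice]
    simp
  · rw [if_neg h1, if_neg h1]
    by_cases h2 : PySem.Str.startswith name "cat__"
    · rw [if_pos h2, if_pos h2]
      have hpre : "cat__".toList <+: name.toList := by
        rw [PySem.Str.startswith_eq, PySem.Chars.startswith_iff] at h2
        exact h2
      have hfind : PySem.Str.find name "cat__" = 0 := by
        have hinfix : "cat__".toList <:+: name.toList := hpre.isInfix
        have hnn : 0 ≤ PySem.Str.find name "cat__" := (PySem.Str.find_nonneg_iff _ _).mpr hinfix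
        rw [PySem.Str.find_eq] at hnn ⊢
        rcases PySem.Chars.find_spec hnn with ⟨_, hmin⟩
        by_contra hne
        exact hmin 0 (by omega) (by simpa using hpre)
      rw [hfind]
      simp only [hslice]
      simp
    · rw [if_neg h2, if_neg h2]

-- main lemma: A's sorted scan equals B's boundary-prefix scan, for any clean name
lemma cat_part_eq (clean : String) (cat : List String) :
    (match (PySem.List.sorted cat (fun c => PySem.Str.len c) true).find? (pvMatch clean) with
     | some col => col
     | none => clean)
    = (if PySem.Set.contains (PySem.Set.ofList cat) clean then clean
       else match pvScanBoundaries clean.toList (PySem.Set.ofList cat) clean.toList.length with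
            | some s => s
            | none => clean) := by
  set L := PySem.List.sorted cat (fun c => PySem.Str.len c) true with hL
  have hmemL : ∀ x, x ∈ L ↔ x ∈ cat := fun x => PySem.List.mem_sorted cat (fun c => PySem.Str.len c) true x
  cases hfind : L.find? (pvMatch clean) with
  | none =>
    rw [List.find?_eq_none] at hfind
    have hnc : ∀ x ∈ cat, pvMatch clean x ≠ true := fun x hx => hfind x ((hmemL x).mpr hx)
    have hclean : clean ∉ cat := fun h => hnc clean h (pvMatch_self clean)
    rw [if_neg (by simp [PySem.Set.mem_ofList]; exact hclean)]
    have hscan : pvScanBoundaries clean.toList (PySem.Set.ofList cat) clean.toList.length = none := by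
      rw [pvScanBoundaries_eq_none_iff]
      intro i _ ⟨hu, hmem⟩
      rw [PySem.Set.mem_ofList] at hmem
      have := pvMatch_of_hit (cs := clean.toList) hu
      rw [String.ofList_toList] at this
      exact hnc _ hmem this
    rw [hscan]
  | some r =>
    rcases List.find?_eq_some_iff_append.mp hfind with ⟨hPr, pre, suf, hdecomp, hpre⟩
    have hrmem : r ∈ cat := (hmemL r).mp (by rw [hdecomp]; simp)
    -- pairwise: lengths non-increasing along L
    have hpair : L.Pairwise (fun a b => PySem.Str.len b ≤ PySem.Str.len a) :=
      PySem.List.sorted_pairwise_rev cat (fun c => PySem.Str.len c)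
    rw [hdecomp] at hpair
    have hsuf : ∀ y ∈ suf, PySem.Str.len y ≤ PySem.Str.len r := by
      have := (List.pairwise_append.mp hpair).2.1
      exact fun y hy => (List.pairwise_cons.mp this).1 y hy
    -- maximality: any match in cat is at most as long as r, equal length forces equality
    have hmax : ∀ x ∈ cat, pvMatch clean x = true → PySem.Str.len x ≤ PySem.Str.len r := by
      intro x hx hPx
      have hxL : x ∈ pre ++ r :: suf := by rw [← hdecomp]; exact (hmemL x).mpr hx
      rcases List.mem_append.mp hxL with hxp | hxs
      · exact absurd hPx (by simpa using hpre x hxp)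
      · rcases List.mem_cons.mp hxs with rfl | hxs'
        · exact le_refl _
        · exact hsuf x hxs'
    have hlen : ∀ s : String, PySem.Str.len s = (s.toList.length : Int) := by
      intro s; simp
    rcases (pvMatch_iff clean r).mp hPr with ⟨hrpre, hdisj⟩
    have hrle : r.toList.length ≤ clean.toList.length := hrpre.length_le
    by_cases hcc : clean ∈ cat
    · -- clean itself is the longest possible match, so r = clean
      have h1 : clean.toList.length ≤ r.toList.length := by
        have := hmax clean hcc (pvMatch_self clean)
        rw [hlen, hlen] at this; exact_mod_cast this
      have : r = clean := pvMatch_eq_of_length_eq hPr (pvMatch_self clean) (by omega)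
      rw [if_pos (by simp [PySem.Set.mem_ofList]; exact hcc), this]
    · rw [if_neg (by simp [PySem.Set.mem_ofList]; exact hcc)]
      -- r is a proper boundary prefix: r = clean.take k with clean[k] = '_'
      have hne : r.toList.length ≠ clean.toList.length := by
        intro h
        have : r = clean := pvMatch_eq_of_length_eq hPr (pvMatch_self clean) h
        exact hcc (this ▸ hrmem)
      have hu : clean.toList[r.toList.length]? = some '_' := by
        rcases hdisj with h | h
        · omega
        · exact h
      set k := r.toList.length with hk
      have hklt : k < clean.toList.length := by omega
      have hrtake : r.toList = clean.toList.take k := by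
        rw [← List.prefix_iff_eq_take.mp hrpre]
      have hrof : String.ofList (clean.toList.take k) = r := by
        rw [← hrtake, String.ofList_toList]
      have hscan : pvScanBoundaries clean.toList (PySem.Set.ofList cat) clean.toList.length
          = some (String.ofList (clean.toList.take k)) := by
        apply pvScanBoundaries_eq_some_of _ _ _ k hklt hu
        · rw [PySem.Set.mem_ofList, hrof]; exact hrmem
        · intro j hj1 hj2 ⟨hju, hjmem⟩
          rw [PySem.Set.mem_ofList] at hjmem
          have hPj := pvMatch_of_hit (cs := clean.toList) hju
          rw [String.ofList_toList] at hPj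
          have := hmax _ hjmem hPj
          rw [hlen, hlen, String.toList_ofList, List.length_take,
            Nat.min_eq_left (by omega)] at this
          omega
      rw [hscan, hrof]

-- assembled branch equality, for an arbitrary cleaned name
lemma full_eq (clean : String) (num cat : List String) :
    (if num.contains clean then clean
     else match (PySem.List.sorted cat (fun c => PySem.Str.len c) true).find? (pvMatch clean) with
       | some col => col
       | none => clean)
    = (if PySem.Set.contains (PySem.Set.ofList num) clean then clean
       else if PySem.Set.contains (PySem.Set.ofList cat) clean then clean
       else match pvScanBoundaries clean.toList (PySem.Set.ofList cat) clean.toList.length with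
       | some s => s
       | none => clean) := by
  by_cases h : clean ∈ num
  · rw [if_pos (by simpa using h), if_pos (by simp [PySem.Set.mem_ofList]; exact h)]
  · rw [if_neg (by simpa using h), if_neg (by simp [PySem.Set.mem_ofList]; exact h)]
    exact cat_part_eq clean cat

-- ===== VERDICT (by name: the statement is the Claim_ definition above) =====
theorem base_feature_from_transformed_name_py_spec : Claim_equal_base_feature_from_transformed_name_py := by
  intro t num cat _
  unfold Spec_base_feature_from_transformed_name_py
  unfold base_feature_from_transformed_name_py base_feature_from_transformed_name_py_alt
  rw [clean_eq]
  exact full_eq (pvCleanNameAlt t) num cat
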